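-- pv_equiv track=rewrite | github.com/alabavery/HackerRank | src/queens_attack_ii.py | count_in_direction
-- ===== SOURCE A (Python) =====
-- def count_in_direction(n, rSqr1, cSqr1, delta, obstacles):
--     """
--     n: int -> c,r of board
--     rSqr1, cSqr1: int -> queen's sqr
--     delta: tuple(int,int) -> change to r and c to gontinue path
--     obstacles: list of obstacles
--     """
--     this_sqr = [rSqr1,cSqr1]
--     attackable_ctr = 0
--     while True:
--         this_sqr[0]+=delta[0]
--         this_sqr[1]+=delta[1]
--         off_sides = (this_sqr[0] < 1 or this_sqr[0] > n)
--         off_top_bottom = (this_sqr[1] < 1 or this_sqr[1] > n)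
--
--         if off_sides or off_top_bottom:
--             return attackable_ctr
--         if this_sqr in obstacles:
--             return attackable_ctr
--
--         attackable_ctr+=1
-- ===== SOURCE B (Python) =====
-- def count_in_direction(n, rSqr1, cSqr1, delta, obstacles):
--     dr, dc = delta
--     if dr == 0 and dc == 0:
--         return 0  # degenerate direction: blocked/off-board immediately, or the walk never ends
--
--     # farthest step count (k >= 1) before this axis falls off the board; None = unbounded
--     def axis_limit(start, d):
--         if d > 0:
--             return max(0, (n - start) // d) if start + d >= 1 else 0
--         if d < 0:
--             return max(0, (start - 1) // (-d)) if start + d <= n else 0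
--         return None if 1 <= start <= n else 0
--
--     lr = axis_limit(rSqr1, dr)
--     lc = axis_limit(cSqr1, dc)
--     limit = min(l for l in (lr, lc) if l is not None)
--
--     # one pass over obstacles: the nearest obstacle on the ray lowers the limit
--     for ob in obstacles:
--         if len(ob) != 2:
--             continue
--         orow, ocol = ob
--         if dr != 0:
--             if (orow - rSqr1) % dr != 0:
--                 continue
--             k = (orow - rSqr1) // dr
--             if k >= 1 and cSqr1 + k * dc == ocol and k - 1 < limit:
--                 limit = k - 1
--         else:
--             if (ocol - cSqr1) % dc != 0:
--                 continue
--             k = (ocol - cSqr1) // dc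
--             if k >= 1 and rSqr1 + k * dr == orow and k - 1 < limit:
--                 limit = k - 1
--     return limit
-- ===== Notes on version B (the rewrite author's own statement) =====
-- stated objective: alternative
-- what changed: Instead of walking the ray square by square and testing membership in the obstacle list at every step, B computes the distance to the board edge in closed form and makes a single pass over the obstacles, solving for the step index of each obstacle on the ray and keeping the nearest blocker.
import Mathlib
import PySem

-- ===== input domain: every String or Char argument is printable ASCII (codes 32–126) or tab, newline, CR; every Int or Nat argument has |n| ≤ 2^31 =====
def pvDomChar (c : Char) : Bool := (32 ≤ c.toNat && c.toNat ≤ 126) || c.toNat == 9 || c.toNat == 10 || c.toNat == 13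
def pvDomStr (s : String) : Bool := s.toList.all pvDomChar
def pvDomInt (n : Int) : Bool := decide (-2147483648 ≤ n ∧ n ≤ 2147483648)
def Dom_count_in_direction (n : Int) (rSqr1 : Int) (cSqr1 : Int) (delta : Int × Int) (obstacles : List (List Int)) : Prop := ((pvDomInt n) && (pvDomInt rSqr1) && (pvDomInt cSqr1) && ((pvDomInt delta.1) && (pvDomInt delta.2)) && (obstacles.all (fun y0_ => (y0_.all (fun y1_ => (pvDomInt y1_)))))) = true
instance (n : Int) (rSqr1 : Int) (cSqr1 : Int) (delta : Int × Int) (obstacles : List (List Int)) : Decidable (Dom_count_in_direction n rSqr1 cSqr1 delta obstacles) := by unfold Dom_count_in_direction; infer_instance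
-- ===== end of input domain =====

-- B replaces A's square-by-square walk (a membership test per square) by a closed-form edge
-- distance plus one pass over the obstacles solving for each obstacle's step index on the ray
-- (objective: alternative).

-- ===== PORT A =====
-- A's 'while True' walk; the fuel only makes the recursion total in Lean: on every input
-- admitted by Pre_ the loop returns before the fuel is exhausted (proved below).
def loopA (n dr dc : Int) (obstacles : List (List Int)) : Nat → Int → Int → Int → Int
  | 0, _, _, ctr => ctr
  | fuel+1, r, c, ctr =>
    let r' := r + dr
    let c' := c + dc
    let off_sides := r' < 1 ∨ r' > n
    let off_top_bottom := c' < 1 ∨ c' > n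
    if off_sides ∨ off_top_bottom then ctr
    else if [r', c'] ∈ obstacles then ctr
    else loopA n dr dc obstacles fuel r' c' (ctr + 1)

def count_in_direction (n : Int) (rSqr1 : Int) (cSqr1 : Int) (delta : Int × Int) (obstacles : List (List Int)) : Int :=
  loopA n delta.1 delta.2 obstacles ((|n| + |rSqr1| + |cSqr1|).toNat + 2) rSqr1 cSqr1 0

-- ===== PORT B =====
-- Source B's axis_limit: farthest step count (k ≥ 1) before this axis leaves the board; none = unbounded
def axisLimB (n start d : Int) : Option Int :=
  if 0 < d then some (if 1 ≤ start + d then max 0 (PySem.Int.floordiv (n - start) d) else 0)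
  else if d < 0 then some (if start + d ≤ n then max 0 (PySem.Int.floordiv (start - 1) (-d)) else 0)
  else if 1 ≤ start ∧ start ≤ n then none else some 0

-- Source B's 'min(l for l in (lr, lc) if l is not None)' (both none is unreachable: dr = dc = 0 is guarded)
def rayLimit (n dr dc r c : Int) : Int :=
  match axisLimB n r dr, axisLimB n c dc with
  | some a, some b => min a b
  | some a, none => a
  | none, some b => b
  | none, none => 0

-- Source B's loop body: lower the limit if this obstacle lies on the ray at step k with k - 1 < limit
def hitStep (rS cS dr dc : Int) (limit : Int) (ob : List Int) : Int :=
  match ob with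
  | [orow, ocol] =>
    if dr ≠ 0 then
      if PySem.Int.mod (orow - rS) dr ≠ 0 then limit
      else
        let k := PySem.Int.floordiv (orow - rS) dr
        if 1 ≤ k ∧ cS + k * dc = ocol ∧ k - 1 < limit then k - 1 else limit
    else
      if PySem.Int.mod (ocol - cS) dc ≠ 0 then limit
      else
        let k := PySem.Int.floordiv (ocol - cS) dc
        if 1 ≤ k ∧ rS + k * dr = orow ∧ k - 1 < limit then k - 1 else limit
  | _ => limit

def count_in_direction_alt (n : Int) (rSqr1 : Int) (cSqr1 : Int) (delta : Int × Int) (obstacles : List (List Int)) : Int :=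
  let dr := delta.1
  let dc := delta.2
  if dr = 0 ∧ dc = 0 then 0
  else obstacles.foldl (hitStep rSqr1 cSqr1 dr dc) (rayLimit n dr dc rSqr1 cSqr1)

-- ===== PRECONDITION & SPEC =====
-- Pre_ excludes exactly the inputs on which A diverges (delta = (0,0) with the queen on the
-- board and not standing on an obstacle: the while-loop never exits); A returns on all others.
def Pre_count_in_direction (n : Int) (rSqr1 : Int) (cSqr1 : Int) (delta : Int × Int) (obstacles : List (List Int)) : Prop :=
  ¬ (delta.1 = 0 ∧ delta.2 = 0) ∨ rSqr1 < 1 ∨ n < rSqr1 ∨ cSqr1 < 1 ∨ n < cSqr1 ∨ [rSqr1, cSqr1] ∈ obstacles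

instance (n : Int) (rSqr1 : Int) (cSqr1 : Int) (delta : Int × Int) (obstacles : List (List Int)) : Decidable (Pre_count_in_direction n rSqr1 cSqr1 delta obstacles) := by unfold Pre_count_in_direction; infer_instance

def pvWitness_count_in_direction : Int × Int × Int × (Int × Int) × List (List Int) := (8, 4, 4, (0, 1), [[4, 7]])

def Spec_count_in_direction (n : Int) (rSqr1 : Int) (cSqr1 : Int) (delta : Int × Int) (obstacles : List (List Int)) (out : Int) : Prop := out = count_in_direction_alt n rSqr1 cSqr1 delta obstacles
instance (n : Int) (rSqr1 : Int) (cSqr1 : Int) (delta : Int × Int) (obstacles : List (List Int)) (out : Int) : Decidable (Spec_count_in_direction n rSqr1 cSqr1 delta obstacles out) := by unfold Spec_count_in_direction; infer_instance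

-- ===== CLAIM (what is proved, stated in full; the proofs are below) =====
def Claim_equal_count_in_direction : Prop := ∀ (n : Int) (rSqr1 : Int) (cSqr1 : Int) (delta : Int × Int) (obstacles : List (List Int)), Dom_count_in_direction n rSqr1 cSqr1 delta obstacles → Pre_count_in_direction n rSqr1 cSqr1 delta obstacles → Spec_count_in_direction n rSqr1 cSqr1 delta obstacles (count_in_direction n rSqr1 cSqr1 delta obstacles)

-- ===== LEMMAS AND PROOFS =====

-- proof-side mirror of B's obstacle test: the step index at which ob is hit, if any
def hitKq (rS cS dr dc : Int) (ob : List Int) : Option Int :=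
  match ob with
  | [orow, ocol] =>
    if dr ≠ 0 then
      if PySem.Int.mod (orow - rS) dr = 0 ∧ 1 ≤ PySem.Int.floordiv (orow - rS) dr ∧
          cS + PySem.Int.floordiv (orow - rS) dr * dc = ocol
      then some (PySem.Int.floordiv (orow - rS) dr) else none
    else
      if PySem.Int.mod (ocol - cS) dc = 0 ∧ 1 ≤ PySem.Int.floordiv (ocol - cS) dc ∧
          rS + PySem.Int.floordiv (ocol - cS) dc * dr = orow
      then some (PySem.Int.floordiv (ocol - cS) dc) else none
  | _ => none

-- B's whole computation in the non-degenerate case, as a function of the current square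
def Bres (n dr dc : Int) (obstacles : List (List Int)) (r c : Int) : Int :=
  List.foldl (hitStep r c dr dc) (rayLimit n dr dc r c) obstacles

theorem axisLim_nonneg (n s d a : Int) (h : axisLimB n s d = some a) : 0 ≤ a := by
  unfold axisLimB at h
  split_ifs at h <;> simp only [Option.some.injEq] at h <;> omega

theorem axisLim_none (n s d : Int) (h : axisLimB n s d = none) : d = 0 ∧ 1 ≤ s ∧ s ≤ n := by
  unfold axisLimB at h
  split_ifs at h with h1 h2 h3 <;> simp_all
  omega

theorem axisLim_one_iff (n s d a : Int) (h : axisLimB n s d = some a) :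
    1 ≤ a ↔ (1 ≤ s + d ∧ s + d ≤ n) := by
  unfold axisLimB at h
  split_ifs at h with h1 h2 h3 h4 h5 h6 <;> simp only [Option.some.injEq] at h
  · have hq : 1 ≤ PySem.Int.floordiv (n - s) d ↔ 1 * d ≤ n - s :=
      PySem.Int.le_floordiv_iff_mul_le h1
    omega
  · omega
  · have hq : 1 ≤ PySem.Int.floordiv (s - 1) (-d) ↔ 1 * (-d) ≤ s - 1 :=
      PySem.Int.le_floordiv_iff_mul_le (by omega : (0:Int) < -d)
    omega
  · omega
  · omega

theorem axisLim_shift (n s d a : Int) (h : axisLimB n s d = some a) (ha : 1 ≤ a) :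
    axisLimB n (s + d) d = some (a - 1) := by
  have hb := (axisLim_one_iff n s d a h).mp ha
  by_cases h1 : 0 < d
  · have e1 : PySem.Int.floordiv (n - (s + d)) d = PySem.Int.floordiv (n - s) d - 1 := by
      rw [PySem.Int.floordiv_eq_ediv_of_pos h1, PySem.Int.floordiv_eq_ediv_of_pos h1,
        show n - (s + d) = (n - s) + (-1) * d by ring,
        Int.add_mul_ediv_right _ _ (by omega : d ≠ 0)]
      ring
    simp only [axisLimB, if_pos h1, Option.some.injEq] at h ⊢
    rw [if_pos hb.1] at h
    rw [if_pos (by omega : 1 ≤ s + d + d), e1]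
    omega
  · by_cases h2 : d < 0
    · have e1 : PySem.Int.floordiv (s + d - 1) (-d) = PySem.Int.floordiv (s - 1) (-d) - 1 := by
        rw [PySem.Int.floordiv_eq_ediv_of_pos (by omega : (0:Int) < -d),
          PySem.Int.floordiv_eq_ediv_of_pos (by omega : (0:Int) < -d),
          show s + d - 1 = (s - 1) + (-1) * (-d) by ring,
          Int.add_mul_ediv_right _ _ (by omega : -d ≠ 0)]
        ring
      simp only [axisLimB, if_neg h1, if_pos h2, Option.some.injEq] at h ⊢
      rw [if_pos hb.2] at h
      rw [if_pos (by omega : s + d + d ≤ n), e1]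
      omega
    · -- d = 0: then the some-branch forces a = 0, contradicting 1 ≤ a
      have hd0 : d = 0 := by omega
      subst hd0
      simp only [axisLimB, if_neg h1, if_neg h2] at h
      split_ifs at h
      omega


theorem axisLim_bound (n s d a : Int) (hd : d ≠ 0) (h : axisLimB n s d = some a) :
    a ≤ |n| + |s| := by
  have hn1 := le_abs_self n
  have hn2 := neg_abs_le n
  have hs1 := le_abs_self s
  have hs2 := neg_abs_le s
  unfold axisLimB at h
  split_ifs at h with h1 h2 h3 h4 h5 h6 <;> simp only [Option.some.injEq] at h
  · have hlt : PySem.Int.floordiv (n - s) d < |n| + |s| + 1 := by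
      rw [PySem.Int.floordiv_lt_iff_lt_mul h1]
      nlinarith
    omega
  · omega
  · have hlt : PySem.Int.floordiv (s - 1) (-d) < |n| + |s| + 1 := by
      rw [PySem.Int.floordiv_lt_iff_lt_mul (by omega : (0:Int) < -d)]
      nlinarith
    omega
  · omega
  · omega

theorem rayLimit_nonneg (n dr dc r c : Int) : 0 ≤ rayLimit n dr dc r c := by
  unfold rayLimit
  cases h1 : axisLimB n r dr <;> cases h2 : axisLimB n c dc <;> simp only
  · omega
  · exact axisLim_nonneg _ _ _ _ h2
  · exact axisLim_nonneg _ _ _ _ h1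
  · exact le_min (axisLim_nonneg _ _ _ _ h1) (axisLim_nonneg _ _ _ _ h2)

theorem rayLimit_one_iff (n dr dc r c : Int) (hD : ¬(dr = 0 ∧ dc = 0)) :
    1 ≤ rayLimit n dr dc r c ↔ (1 ≤ r + dr ∧ r + dr ≤ n ∧ 1 ≤ c + dc ∧ c + dc ≤ n) := by
  unfold rayLimit
  cases h1 : axisLimB n r dr <;> cases h2 : axisLimB n c dc <;> simp only
  · exact absurd ⟨(axisLim_none _ _ _ h1).1, (axisLim_none _ _ _ h2).1⟩ hD
  · have hr := axisLim_none _ _ _ h1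
    have hio := axisLim_one_iff _ _ _ _ h2
    omega
  · have hc := axisLim_none _ _ _ h2
    have hio := axisLim_one_iff _ _ _ _ h1
    omega
  · have hio1 := axisLim_one_iff _ _ _ _ h1
    have hio2 := axisLim_one_iff _ _ _ _ h2
    omega

theorem rayLimit_shift (n dr dc r c : Int) (hD : ¬(dr = 0 ∧ dc = 0))
    (h1 : 1 ≤ rayLimit n dr dc r c) :
    rayLimit n dr dc (r + dr) (c + dc) = rayLimit n dr dc r c - 1 := by
  unfold rayLimit at h1 ⊢
  cases h1r : axisLimB n r dr <;> cases h1c : axisLimB n c dc <;>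
    rw [h1r, h1c] at h1 <;> simp only at h1 ⊢
  · exact absurd ⟨(axisLim_none _ _ _ h1r).1, (axisLim_none _ _ _ h1c).1⟩ hD
  case none.some b =>
    obtain ⟨hd0, _, _⟩ := axisLim_none _ _ _ h1r
    subst hd0
    rw [add_zero, h1r, axisLim_shift _ _ _ _ h1c h1]
  case some.none a =>
    obtain ⟨hd0, _, _⟩ := axisLim_none _ _ _ h1c
    subst hd0
    rw [add_zero, h1c, axisLim_shift _ _ _ _ h1r h1]
  case some.some a b =>
    rw [axisLim_shift _ _ _ _ h1r (by omega), axisLim_shift _ _ _ _ h1c (by omega)]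
    simp only
    omega

theorem rayLimit_bound (n dr dc r c : Int) (hD : ¬(dr = 0 ∧ dc = 0)) :
    rayLimit n dr dc r c ≤ |n| + |r| + |c| := by
  have har := abs_nonneg r
  have hac := abs_nonneg c
  unfold rayLimit
  by_cases hdr : dr = 0
  · have hdc : dc ≠ 0 := fun h => hD ⟨hdr, h⟩
    cases h2 : axisLimB n c dc
    · exact absurd (axisLim_none _ _ _ h2).1 hdc
    next b =>
      have hb := axisLim_bound _ _ _ _ hdc h2
      cases h1 : axisLimB n r dr <;> simp only <;> omega
  · cases h1 : axisLimB n r dr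
    · exact absurd (axisLim_none _ _ _ h1).1 hdr
    next a =>
      have ha := axisLim_bound _ _ _ _ hdr h1
      cases h2 : axisLimB n c dc <;> simp only <;> omega

theorem floordiv_mod_key (x d k : Int) (hd : d ≠ 0) :
    (PySem.Int.mod x d = 0 ∧ PySem.Int.floordiv x d = k) ↔ x = k * d := by
  constructor
  · rintro ⟨hm, hf⟩
    have h := PySem.Int.floordiv_mul_add_mod x d
    rw [hm, hf] at h
    linarith
  · rintro rfl
    have hm : PySem.Int.mod (k * d) d = 0 :=
      (PySem.Int.mod_eq_zero_iff_dvd _ _).mpr (dvd_mul_left d k)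
    have h := PySem.Int.floordiv_mul_add_mod (k * d) d
    rw [hm] at h
    exact ⟨hm, mul_right_cancel₀ hd (by linarith)⟩

theorem hitKq_iff (rS cS dr dc : Int) (hD : ¬(dr = 0 ∧ dc = 0)) (ob : List Int) (k : Int) :
    hitKq rS cS dr dc ob = some k ↔ (1 ≤ k ∧ ob = [rS + k * dr, cS + k * dc]) := by
  rcases ob with _ | ⟨orow, _ | ⟨ocol, _ | ⟨z, t⟩⟩⟩
  · simp [hitKq]
  · simp [hitKq]
  case cons.cons.nil =>
    simp only [hitKq]
    by_cases hdr : dr = 0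
    · have hdc : dc ≠ 0 := fun h => hD ⟨hdr, h⟩
      rw [if_neg (by simpa using hdr)]
      constructor
      · intro h
        split_ifs at h with hc
        · simp only [Option.some.injEq] at h
          obtain ⟨hm, hk1, hcol⟩ := hc
          have hx := (floordiv_mod_key (ocol - cS) dc _ hdc).mp ⟨hm, rfl⟩
          subst h
          refine ⟨hk1, ?_⟩
          simp only [List.cons.injEq, and_true]
          constructor <;> linarith
      · rintro ⟨hk1, heq⟩
        simp only [List.cons.injEq, and_true] at heq
        obtain ⟨hrow, hcol⟩ := heq
        have hx : ocol - cS = k * dc := by linarith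
        obtain ⟨hm, hf⟩ := (floordiv_mod_key (ocol - cS) dc k hdc).mpr hx
        rw [if_pos ⟨hm, by omega, by rw [hf]; linarith⟩, hf]
    · rw [if_pos hdr]
      constructor
      · intro h
        split_ifs at h with hc
        · simp only [Option.some.injEq] at h
          obtain ⟨hm, hk1, hcol⟩ := hc
          have hx := (floordiv_mod_key (orow - rS) dr _ hdr).mp ⟨hm, rfl⟩
          subst h
          refine ⟨hk1, ?_⟩
          simp only [List.cons.injEq, and_true]
          constructor <;> linarith
      · rintro ⟨hk1, heq⟩
        simp only [List.cons.injEq, and_true] at heq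
        obtain ⟨hrow, hcol⟩ := heq
        have hx : orow - rS = k * dr := by linarith
        obtain ⟨hm, hf⟩ := (floordiv_mod_key (orow - rS) dr k hdr).mpr hx
        rw [if_pos ⟨hm, by omega, by rw [hf]; linarith⟩, hf]
  · simp [hitKq]

theorem hitKq_pos (rS cS dr dc : Int) (ob : List Int) (k : Int)
    (h : hitKq rS cS dr dc ob = some k) : 1 ≤ k := by
  rcases ob with _ | ⟨orow, _ | ⟨ocol, _ | ⟨z, t⟩⟩⟩
  · simp [hitKq] at h
  · simp [hitKq] at h
  case cons.cons.nil =>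
    simp only [hitKq] at h
    split_ifs at h with h1 h2 h3 <;> simp only [Option.some.injEq] at h
    · exact h ▸ h2.2.1
    · exact h ▸ h3.2.1
  · simp [hitKq] at h

theorem branch_step (m q : Int) (C : Prop) [Decidable C] (limit : Int) :
    (if m ≠ 0 then limit else if 1 ≤ q ∧ C ∧ q - 1 < limit then q - 1 else limit) =
      (match (if m = 0 ∧ 1 ≤ q ∧ C then some q else none : Option Int) with
        | some k => min limit (k - 1)
        | none => limit) := by
  by_cases hm : m = 0
  · rw [if_neg (by simpa using hm)]
    by_cases hq : 1 ≤ q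
    · by_cases hC : C
      · have hR : (match (if m = 0 ∧ 1 ≤ q ∧ C then some q else none : Option Int) with
            | some k => min limit (k - 1)
            | none => limit) = min limit (q - 1) := by
          rw [if_pos ⟨hm, hq, hC⟩]
        rw [hR]
        by_cases hlt : q - 1 < limit
        · rw [if_pos ⟨hq, hC, hlt⟩, min_eq_right (by omega : q - 1 ≤ limit)]
        · rw [if_neg (fun h => hlt h.2.2), min_eq_left (by omega : limit ≤ q - 1)]
      · have hR : (match (if m = 0 ∧ 1 ≤ q ∧ C then some q else none : Option Int) with
            | some k => min limit (k - 1)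
            | none => limit) = limit := by
          rw [if_neg (fun h => hC h.2.2)]
        rw [hR, if_neg (fun h => hC h.2.1)]
    · have hR : (match (if m = 0 ∧ 1 ≤ q ∧ C then some q else none : Option Int) with
          | some k => min limit (k - 1)
          | none => limit) = limit := by
        rw [if_neg (fun h => hq h.2.1)]
      rw [hR, if_neg (fun h => hq h.1)]
  · have hR : (match (if m = 0 ∧ 1 ≤ q ∧ C then some q else none : Option Int) with
        | some k => min limit (k - 1)
        | none => limit) = limit := by
      rw [if_neg (fun h => hm h.1)]
    rw [hR, if_pos hm]

theorem hitStep_eq (rS cS dr dc limit : Int) (ob : List Int) :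
    hitStep rS cS dr dc limit ob =
      match hitKq rS cS dr dc ob with
      | some k => min limit (k - 1)
      | none => limit := by
  rcases ob with _ | ⟨orow, _ | ⟨ocol, _ | ⟨z, t⟩⟩⟩
  · rfl
  · rfl
  case cons.cons.nil =>
    simp only [hitStep, hitKq]
    by_cases hdr : dr ≠ 0
    · rw [if_pos hdr, if_pos hdr]
      exact branch_step _ _ _ _
    · rw [if_neg hdr, if_neg hdr]
      exact branch_step _ _ _ _
  · rfl

theorem hitStep_eq_none (rS cS dr dc limit : Int) (ob : List Int)
    (h : hitKq rS cS dr dc ob = none) : hitStep rS cS dr dc limit ob = limit := by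
  rw [hitStep_eq, h]

theorem hitStep_eq_some (rS cS dr dc limit : Int) (ob : List Int) (k : Int)
    (h : hitKq rS cS dr dc ob = some k) : hitStep rS cS dr dc limit ob = min limit (k - 1) := by
  rw [hitStep_eq, h]

-- ---- shift lemmas for hits ----

theorem hitKq_shift_up (rS cS dr dc : Int) (hD : ¬(dr = 0 ∧ dc = 0)) (ob : List Int) (k : Int)
    (h : hitKq (rS + dr) (cS + dc) dr dc ob = some k) :
    hitKq rS cS dr dc ob = some (k + 1) := by
  rw [hitKq_iff _ _ _ _ hD] at h ⊢
  obtain ⟨hk, rfl⟩ := h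
  refine ⟨by omega, ?_⟩
  simp only [List.cons.injEq, and_true]
  constructor <;> ring

theorem hitKq_shift_down (rS cS dr dc : Int) (hD : ¬(dr = 0 ∧ dc = 0)) (ob : List Int) (k : Int)
    (h : hitKq rS cS dr dc ob = some k) (h2 : 2 ≤ k) :
    hitKq (rS + dr) (cS + dc) dr dc ob = some (k - 1) := by
  rw [hitKq_iff _ _ _ _ hD] at h ⊢
  obtain ⟨hk, rfl⟩ := h
  refine ⟨by omega, ?_⟩
  simp only [List.cons.injEq, and_true]
  constructor <;> ring

theorem hitKq_shift_none (rS cS dr dc : Int) (hD : ¬(dr = 0 ∧ dc = 0)) (ob : List Int)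
    (h : hitKq rS cS dr dc ob = none ∨ hitKq rS cS dr dc ob = some 1) :
    hitKq (rS + dr) (cS + dc) dr dc ob = none := by
  cases hh : hitKq (rS + dr) (cS + dc) dr dc ob with
  | none => rfl
  | some j =>
    exfalso
    have hj := hitKq_pos _ _ _ _ _ _ hh
    have hup := hitKq_shift_up rS cS dr dc hD ob j hh
    rcases h with h | h <;> rw [h] at hup
    · simp at hup
    · simp only [Option.some.injEq] at hup
      omega

-- ---- fold lemmas ----

theorem hitStep_le (rS cS dr dc limit : Int) (ob : List Int) :
    hitStep rS cS dr dc limit ob ≤ limit := by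
  cases hh : hitKq rS cS dr dc ob with
  | none => rw [hitStep_eq_none _ _ _ _ _ _ hh]
  | some k => rw [hitStep_eq_some _ _ _ _ _ _ _ hh]; exact min_le_left _ _

theorem hitStep_nonneg (rS cS dr dc a : Int) (ob : List Int) (h : 0 ≤ a) :
    0 ≤ hitStep rS cS dr dc a ob := by
  cases hh : hitKq rS cS dr dc ob with
  | none => rw [hitStep_eq_none _ _ _ _ _ _ hh]; exact h
  | some k =>
    rw [hitStep_eq_some _ _ _ _ _ _ _ hh]
    have hk := hitKq_pos _ _ _ _ _ _ hh
    exact le_min h (by omega)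

theorem foldl_hitStep_le (rS cS dr dc : Int) (l : List (List Int)) :
    ∀ acc : Int, List.foldl (hitStep rS cS dr dc) acc l ≤ acc := by
  induction l with
  | nil => intro acc; simp
  | cons ob t ih =>
    intro acc
    calc List.foldl (hitStep rS cS dr dc) (hitStep rS cS dr dc acc ob) t
        ≤ hitStep rS cS dr dc acc ob := ih _
      _ ≤ acc := hitStep_le _ _ _ _ _ _

theorem foldl_hitStep_nonneg (rS cS dr dc : Int) (l : List (List Int)) :
    ∀ acc : Int, 0 ≤ acc → 0 ≤ List.foldl (hitStep rS cS dr dc) acc l := by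
  induction l with
  | nil => intro acc h; simpa
  | cons ob t ih => intro acc h; exact ih _ (hitStep_nonneg _ _ _ _ _ _ h)

theorem foldl_hitStep_le_hit (rS cS dr dc : Int) (l : List (List Int)) :
    ∀ (acc k : Int) (ob : List Int), ob ∈ l → hitKq rS cS dr dc ob = some k →
      List.foldl (hitStep rS cS dr dc) acc l ≤ k - 1 := by
  induction l with
  | nil => intro acc k ob h; simp at h
  | cons a t ih =>
    intro acc k ob hmem hh
    rcases List.mem_cons.mp hmem with rfl | hmem
    · calc List.foldl (hitStep rS cS dr dc) (hitStep rS cS dr dc acc ob) t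
          ≤ hitStep rS cS dr dc acc ob := foldl_hitStep_le _ _ _ _ _ _
        _ ≤ k - 1 := by rw [hitStep_eq_some _ _ _ _ _ _ _ hh]; exact min_le_right _ _
    · exact ih _ k ob hmem hh

theorem foldl_hitStep_shift (rS cS dr dc : Int) (hD : ¬(dr = 0 ∧ dc = 0))
    (l : List (List Int)) :
    ∀ acc : Int, 1 ≤ acc → (∀ ob ∈ l, hitKq rS cS dr dc ob ≠ some 1) →
      List.foldl (hitStep rS cS dr dc) acc l =
        List.foldl (hitStep (rS + dr) (cS + dc) dr dc) (acc - 1) l + 1 := by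
  induction l with
  | nil => intro acc h1 h2; simp only [List.foldl_nil]; omega
  | cons ob t ih =>
    intro acc h1 h2
    simp only [List.foldl_cons]
    cases hh : hitKq rS cS dr dc ob with
    | none =>
      have hsh := hitKq_shift_none rS cS dr dc hD ob (Or.inl hh)
      rw [hitStep_eq_none _ _ _ _ _ _ hh, hitStep_eq_none _ _ _ _ _ _ hsh]
      exact ih acc h1 (fun o ho => h2 o (List.mem_cons_of_mem _ ho))
    | some k =>
      have hk1 := hitKq_pos _ _ _ _ _ _ hh
      have hkne : k ≠ 1 := fun he => h2 ob List.mem_cons_self (he ▸ hh)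
      have hsh := hitKq_shift_down rS cS dr dc hD ob k hh (by omega)
      rw [hitStep_eq_some _ _ _ _ _ _ _ hh, hitStep_eq_some _ _ _ _ _ _ _ hsh]
      have e1 : min (acc - 1) (k - 1 - 1) = min acc (k - 1) - 1 := by
        rw [min_def, min_def]
        split_ifs <;> omega
      rw [e1]
      exact ih _ (le_min h1 (by omega)) (fun o ho => h2 o (List.mem_cons_of_mem _ ho))

theorem mem_iff_hit1 (rS cS dr dc : Int) (hD : ¬(dr = 0 ∧ dc = 0))
    (obstacles : List (List Int)) :
    [rS + dr, cS + dc] ∈ obstacles ↔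
      ∃ ob ∈ obstacles, hitKq rS cS dr dc ob = some 1 := by
  constructor
  · intro h
    refine ⟨_, h, (hitKq_iff _ _ _ _ hD _ _).mpr ⟨le_refl 1, ?_⟩⟩
    simp
  · rintro ⟨ob, hmem, hh⟩
    obtain ⟨_, rfl⟩ := (hitKq_iff _ _ _ _ hD _ _).mp hh
    simpa using hmem

-- ---- Bres recursion ----

theorem Bres_nonneg (n dr dc : Int) (obstacles : List (List Int)) (r c : Int) :
    0 ≤ Bres n dr dc obstacles r c :=
  foldl_hitStep_nonneg _ _ _ _ _ _ (rayLimit_nonneg n dr dc r c)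

theorem Bres_off (n dr dc : Int) (obstacles : List (List Int)) (r c : Int)
    (hD : ¬(dr = 0 ∧ dc = 0))
    (hoff : (r + dr < 1 ∨ r + dr > n) ∨ (c + dc < 1 ∨ c + dc > n)) :
    Bres n dr dc obstacles r c = 0 := by
  have h0 : rayLimit n dr dc r c = 0 := by
    have h1 := rayLimit_one_iff n dr dc r c hD
    have h2 := rayLimit_nonneg n dr dc r c
    omega
  have h3 := foldl_hitStep_le r c dr dc obstacles (rayLimit n dr dc r c)
  have h4 := Bres_nonneg n dr dc obstacles r c
  unfold Bres at h4 ⊢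
  omega

theorem Bres_hit (n dr dc : Int) (obstacles : List (List Int)) (r c : Int)
    (hD : ¬(dr = 0 ∧ dc = 0)) (hmem : [r + dr, c + dc] ∈ obstacles) :
    Bres n dr dc obstacles r c = 0 := by
  obtain ⟨ob, hm, hh⟩ := (mem_iff_hit1 r c dr dc hD obstacles).mp hmem
  have h1 := foldl_hitStep_le_hit r c dr dc obstacles (rayLimit n dr dc r c) 1 ob hm hh
  have h2 := Bres_nonneg n dr dc obstacles r c
  unfold Bres at h2 ⊢
  omega

theorem Bres_step (n dr dc : Int) (obstacles : List (List Int)) (r c : Int)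
    (hD : ¬(dr = 0 ∧ dc = 0))
    (hon : 1 ≤ r + dr ∧ r + dr ≤ n ∧ 1 ≤ c + dc ∧ c + dc ≤ n)
    (hnm : [r + dr, c + dc] ∉ obstacles) :
    Bres n dr dc obstacles r c = Bres n dr dc obstacles (r + dr) (c + dc) + 1 := by
  have h1 : 1 ≤ rayLimit n dr dc r c := (rayLimit_one_iff n dr dc r c hD).mpr hon
  have hno : ∀ ob ∈ obstacles, hitKq r c dr dc ob ≠ some 1 :=
    fun ob hm hh => hnm ((mem_iff_hit1 r c dr dc hD obstacles).mpr ⟨ob, hm, hh⟩)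
  unfold Bres
  rw [foldl_hitStep_shift r c dr dc hD obstacles _ h1 hno, rayLimit_shift n dr dc r c hD h1]

-- ---- the loop computes Bres ----

theorem loopA_eq (n dr dc : Int) (obstacles : List (List Int)) (hD : ¬(dr = 0 ∧ dc = 0)) :
    ∀ (fuel : Nat) (r c ctr : Int), Bres n dr dc obstacles r c < (fuel : Int) →
      loopA n dr dc obstacles fuel r c ctr = ctr + Bres n dr dc obstacles r c := by
  intro fuel
  induction fuel with
  | zero =>
    intro r c ctr h
    have := Bres_nonneg n dr dc obstacles r c
    norm_num at h
    omega
  | succ f ih =>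
    intro r c ctr h
    simp only [loopA]
    by_cases hoff : (r + dr < 1 ∨ r + dr > n) ∨ (c + dc < 1 ∨ c + dc > n)
    · rw [if_pos hoff, Bres_off n dr dc obstacles r c hD hoff]
      omega
    · rw [if_neg hoff]
      by_cases hmem : [r + dr, c + dc] ∈ obstacles
      · rw [if_pos hmem, Bres_hit n dr dc obstacles r c hD hmem]
        omega
      · rw [if_neg hmem]
        have hstep := Bres_step n dr dc obstacles r c hD (by omega) hmem
        rw [ih (r + dr) (c + dc) (ctr + 1) (by push_cast at h ⊢; omega)]
        omega

-- ===== VERDICT (by name: the statement is the Claim_ definition above) =====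
theorem count_in_direction_spec : Claim_equal_count_in_direction := by
  intro n rS cS delta obstacles hdom hpre
  obtain ⟨dr, dc⟩ := delta
  unfold Spec_count_in_direction count_in_direction count_in_direction_alt
  simp only
  by_cases hD : dr = 0 ∧ dc = 0
  · obtain ⟨rfl, rfl⟩ := hD
    rw [if_pos ⟨rfl, rfl⟩]
    unfold Pre_count_in_direction at hpre
    simp only [and_self, not_true_eq_false, false_or] at hpre
    simp only [loopA, add_zero]
    split_ifs with h1 h2
    · rfl
    · rfl
    · exfalso
      rcases hpre with h | h | h | h | h <;> first | omega | exact h2 h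
  · rw [if_neg hD]
    have hb : Bres n dr dc obstacles rS cS <
        (((|n| + |rS| + |cS|).toNat + 2 : Nat) : Int) := by
      have h1 := foldl_hitStep_le rS cS dr dc obstacles (rayLimit n dr dc rS cS)
      have h2 := rayLimit_bound n dr dc rS cS hD
      have h3 : ((|n| + |rS| + |cS|).toNat : Int) = |n| + |rS| + |cS| :=
        Int.toNat_of_nonneg (by positivity)
      unfold Bres
      push_cast
      omega
    rw [loopA_eq n dr dc obstacles hD _ rS cS 0 hb]
    unfold Bres
    omega
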